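-- pv_equiv track=rewrite | github.com/microsoft/debug-gym | analysis/trajectory_filtering/criteria.py | has_rewrite_after_pdb
-- ===== SOURCE A (Python) =====
-- def has_rewrite_after_pdb(trajectory):
--     """
--     Check if there are any rewrite tool calls after pdb tool calls.
--     This indicates that pdb debugging sessions were useful for informing rewriting behavior.
--
--     Args:
--         trajectory: List of trajectory steps (log entries)
--
--     Returns:
--         bool: True if there's at least one rewrite call after a pdb call
--     """
--     pdb_seen = False
--
--     for step in trajectory:
--         action = step.get("action")
--         if action:
--             tool_name = action.get("name")
--
--             # Track when we've seen a pdb call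
--             if tool_name == "pdb":
--                 pdb_seen = True
--
--             # If we've seen pdb before and now see a rewrite, return True
--             elif tool_name == "rewrite" and pdb_seen:
--                 return True
--
--     return False
-- ===== SOURCE B (Python) =====
-- def _action_name_is(step, name):
--     action = step.get("action")
--     return bool(action) and action.get("name") == name
--
--
-- def has_rewrite_after_pdb(trajectory):
--     """Pivot-then-suffix-scan: locate the first pdb step, then look for a
--     rewrite step strictly after it."""
--     pdb_idx = None
--     for i, step in enumerate(trajectory):
--         if _action_name_is(step, "pdb"):
--             pdb_idx = i
--             break
--     if pdb_idx is None:
--         return False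
--     for step in trajectory[pdb_idx + 1:]:
--         if _action_name_is(step, "rewrite"):
--             return True
--     return False
-- ===== Notes on version B (the rewrite author's own statement) =====
-- stated objective: alternative
-- what changed: Replaced the stateful single-pass pdb_seen flag with a pivot-then-suffix-scan decomposition: first find the index of the earliest pdb step, then scan only the steps strictly after it for a rewrite step.
import Mathlib
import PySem

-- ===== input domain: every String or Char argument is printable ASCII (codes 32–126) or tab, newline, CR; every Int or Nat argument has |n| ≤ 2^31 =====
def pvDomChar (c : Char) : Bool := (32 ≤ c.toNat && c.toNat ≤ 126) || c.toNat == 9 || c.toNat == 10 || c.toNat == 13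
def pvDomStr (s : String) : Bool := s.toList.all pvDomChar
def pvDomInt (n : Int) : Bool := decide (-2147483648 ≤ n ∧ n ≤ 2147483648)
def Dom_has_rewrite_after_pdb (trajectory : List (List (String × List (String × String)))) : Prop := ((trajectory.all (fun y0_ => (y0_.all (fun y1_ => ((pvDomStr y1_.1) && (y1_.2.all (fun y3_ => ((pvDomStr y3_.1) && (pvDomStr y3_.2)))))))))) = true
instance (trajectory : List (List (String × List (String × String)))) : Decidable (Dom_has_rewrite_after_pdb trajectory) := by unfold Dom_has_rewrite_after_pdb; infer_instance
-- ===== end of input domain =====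

-- B replaces A's stateful pdb_seen flag with a pivot-then-suffix-scan decomposition (same O(n) cost).


-- ===== PORT A =====
-- loop over trajectory carrying the pdb_seen flag; `if action` = action present and non-empty dict
def hraLoopA (trajectory : List (List (String × List (String × String)))) (pdb_seen : Bool) : Bool :=
  match trajectory with
  | [] => false
  | step :: rest =>
    match (PySem.Dict.mk step).get? "action" with
    | some action =>
      if action ≠ [] then
        let tool_name := (PySem.Dict.mk action).get? "name"
        if tool_name = some "pdb" then hraLoopA rest true
        else if tool_name = some "rewrite" ∧ pdb_seen then true
        else hraLoopA rest pdb_seen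
      else hraLoopA rest pdb_seen
    | none => hraLoopA rest pdb_seen

def has_rewrite_after_pdb (trajectory : List (List (String × List (String × String)))) : Bool :=
  hraLoopA trajectory false

-- ===== PORT B =====
-- helper _action_name_is(step, name)
def actionNameIs (step : List (String × List (String × String))) (name : String) : Bool :=
  match (PySem.Dict.mk step).get? "action" with
  | some action => action ≠ [] && (PySem.Dict.mk action).get? "name" = some name
  | none => false

-- first loop of B: index of the earliest pdb step (enumerate + break)
def pdbIndexB (trajectory : List (List (String × List (String × String)))) : Option Nat :=
  match trajectory with
  | [] => none
  | step :: rest =>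
    if actionNameIs step "pdb" then some 0 else (pdbIndexB rest).map (· + 1)

-- second loop of B: any rewrite step in the suffix
def anyRewriteB (steps : List (List (String × List (String × String)))) : Bool :=
  match steps with
  | [] => false
  | step :: rest => if actionNameIs step "rewrite" then true else anyRewriteB rest

def has_rewrite_after_pdb_alt (trajectory : List (List (String × List (String × String)))) : Bool :=
  match pdbIndexB trajectory with
  | none => false
  | some i => anyRewriteB (trajectory.drop (i + 1))  -- trajectory[i+1:] with i+1 ≥ 0 is exactly drop

-- ===== PRECONDITION & SPEC =====
def Spec_has_rewrite_after_pdb (trajectory : List (List (String × List (String × String)))) (out : Bool) : Prop := out = has_rewrite_after_pdb_alt trajectory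
instance (trajectory : List (List (String × List (String × String)))) (out : Bool) : Decidable (Spec_has_rewrite_after_pdb trajectory out) := by unfold Spec_has_rewrite_after_pdb; infer_instance

-- ===== CLAIM (what is proved, stated in full; the proofs are below) =====
def Claim_equal_has_rewrite_after_pdb : Prop := ∀ (trajectory : List (List (String × List (String × String)))), Dom_has_rewrite_after_pdb trajectory → Spec_has_rewrite_after_pdb trajectory (has_rewrite_after_pdb trajectory)

-- ===== LEMMAS AND PROOFS =====

-- once pdb has been seen, A's loop is exactly B's rewrite scan
theorem hraLoopA_true (t : List (List (String × List (String × String)))) :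
    hraLoopA t true = anyRewriteB t := by
  induction t with
  | nil => rfl
  | cons step rest ih =>
    cases h : (PySem.Dict.mk step).get? "action" with
    | none => simp only [hraLoopA, anyRewriteB, actionNameIs, h]; exact ih
    | some action =>
      by_cases hne : action = []
      · simp [hraLoopA, anyRewriteB, actionNameIs, h, hne, ih]
      · by_cases hp : (PySem.Dict.mk action).get? "name" = some "pdb"
        · have hr : ¬ (PySem.Dict.mk action).get? "name" = some "rewrite" := by
            rw [hp]; simp
          simp [hraLoopA, anyRewriteB, actionNameIs, h, hne, hp, ih]
        · by_cases hr : (PySem.Dict.mk action).get? "name" = some "rewrite"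
          · simp [hraLoopA, anyRewriteB, actionNameIs, h, hne, hr]
          · simp [hraLoopA, anyRewriteB, actionNameIs, h, hne, hp, hr, ih]

-- B's pivot+suffix scan on s :: rest when s is not the pdb step reduces to B on rest
theorem alt_cons_not_pdb (step : List (String × List (String × String)))
    (rest : List (List (String × List (String × String))))
    (h : actionNameIs step "pdb" = false) :
    has_rewrite_after_pdb_alt (step :: rest) = has_rewrite_after_pdb_alt rest := by
  simp only [has_rewrite_after_pdb_alt, pdbIndexB, h, Bool.false_eq_true, if_false]
  cases hi : pdbIndexB rest with
  | none => simp
  | some i => simp [List.drop]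

theorem hraLoopA_false (t : List (List (String × List (String × String)))) :
    hraLoopA t false = has_rewrite_after_pdb_alt t := by
  induction t with
  | nil => rfl
  | cons step rest ih =>
    cases h : (PySem.Dict.mk step).get? "action" with
    | none =>
      rw [alt_cons_not_pdb step rest (by simp [actionNameIs, h])]
      simp only [hraLoopA, h]
      exact ih
    | some action =>
      by_cases hne : action = []
      · rw [alt_cons_not_pdb step rest (by simp [actionNameIs, h, hne])]
        simp only [hraLoopA, h, hne, ne_eq, not_true_eq_false, if_false]
        exact ih
      · by_cases hp : (PySem.Dict.mk action).get? "name" = some "pdb"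
        · have hb : actionNameIs step "pdb" = true := by simp [actionNameIs, h, hne, hp]
          simp only [hraLoopA, h, hne, ne_eq, not_false_iff, if_true, hp]
          rw [hraLoopA_true]
          simp [has_rewrite_after_pdb_alt, pdbIndexB, hb, List.drop]
        · rw [alt_cons_not_pdb step rest (by simp [actionNameIs, h, hne, hp])]
          simp only [hraLoopA, h, hne, ne_eq, not_false_iff, if_true, hp,
            Bool.false_eq_true, and_false, if_false]
          exact ih

-- ===== VERDICT (by name: the statement is the Claim_ definition above) =====
theorem has_rewrite_after_pdb_spec : Claim_equal_has_rewrite_after_pdb := by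
  intro trajectory _
  unfold Spec_has_rewrite_after_pdb has_rewrite_after_pdb
  exact hraLoopA_false trajectory
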